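-- pv_equiv track=rewrite | github.com/humnasul/cs115notes | practice for exams/practice for test2/practice3.py | listProd
-- ===== SOURCE A (Python) =====
-- def listProd(L,M):
--     if len(L) == 0 and len(M) == 0:
--         return []
--     if len(L) == 0 and len(M) != 0:
--         #you actually don't need to check if the other list is != 0
--         return M[0:]
--     if len(M) == 0 and len(L) != 0:
--         return L[0:]
--     else:
--         return [L[0]*M[0]] + listProd(L[1:], M[1:])
-- ===== SOURCE B (Python) =====
-- def listProd(L, M):
--     result = [x * y for x, y in zip(L, M)]
--     n = len(result)
--     tail = L[n:] if len(L) > len(M) else M[n:]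
--     return result + tail
-- ===== Notes on version B (the rewrite author's own statement) =====
-- stated objective: faster
-- what changed: Replaced A's head-peeling recursion with repeated O(n) list slicing/concatenation by a single zip comprehension plus one tail slice appended once.
import Mathlib
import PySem

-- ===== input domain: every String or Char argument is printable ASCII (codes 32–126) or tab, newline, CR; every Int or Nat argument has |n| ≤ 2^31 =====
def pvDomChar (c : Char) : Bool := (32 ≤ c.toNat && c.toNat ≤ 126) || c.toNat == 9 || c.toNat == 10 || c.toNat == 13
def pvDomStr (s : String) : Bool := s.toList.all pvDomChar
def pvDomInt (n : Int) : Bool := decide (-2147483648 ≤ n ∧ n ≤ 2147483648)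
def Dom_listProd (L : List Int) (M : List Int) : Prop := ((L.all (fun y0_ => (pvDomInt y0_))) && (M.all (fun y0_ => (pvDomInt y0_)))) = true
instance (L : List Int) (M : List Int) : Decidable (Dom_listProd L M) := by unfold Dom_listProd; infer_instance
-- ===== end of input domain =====

-- ===== PORT A =====
-- B replaces A's recursion (which re-slices both tails at every step) by a single
-- zip-comprehension pass plus one appended tail slice.
def listProd (L : List Int) (M : List Int) : List Int :=
  match L, M with
  | [], [] => []
  | [], m :: ms => PySem.List.slice (m :: ms) (some 0) none   -- M[0:]
  | l :: ls, [] => PySem.List.slice (l :: ls) (some 0) none   -- L[0:]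
  | a :: ls, b :: ms => (a * b) :: listProd ls ms             -- [L[0]*M[0]] + listProd(L[1:],M[1:])

-- ===== PORT B =====
def listProd_alt (L : List Int) (M : List Int) : List Int :=
  let result := (L.zip M).map (fun p => p.1 * p.2)
  let n := result.length
  let tail := if L.length > M.length
              then PySem.List.slice L (some (n : Int)) none    -- L[n:]
              else PySem.List.slice M (some (n : Int)) none    -- M[n:]
  result ++ tail

-- ===== PRECONDITION & SPEC =====
def Spec_listProd (L : List Int) (M : List Int) (out : List Int) : Prop := out = listProd_alt L M
instance (L : List Int) (M : List Int) (out : List Int) : Decidable (Spec_listProd L M out) := by unfold Spec_listProd; infer_instance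

-- ===== CLAIM (what is proved, stated in full; the proofs are below) =====
def Claim_equal_listProd : Prop := ∀ (L : List Int) (M : List Int), Dom_listProd L M → Spec_listProd L M (listProd L M)

-- ===== LEMMAS AND PROOFS =====
theorem listProd_eq_alt (L M : List Int) : listProd L M = listProd_alt L M := by
  induction L generalizing M with
  | nil =>
    cases M <;> simp [listProd, listProd_alt, PySem.List.slice_none_none]
  | cons a ls ih =>
    cases M with
    | nil => simp [listProd, listProd_alt, PySem.List.slice_none_none]
    | cons b ms =>
      simp only [listProd, listProd_alt, ih]
      simp only [listProd_alt, ih, List.zip_cons_cons, List.map_cons,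
        List.length_map, List.length_zip, List.length_cons,
        PySem.List.slice_from_natCast, List.drop_succ_cons, List.cons_append]
      by_cases h : ls.length > ms.length <;> simp [h]

-- ===== VERDICT (by name: the statement is the Claim_ definition above) =====
theorem listProd_spec : Claim_equal_listProd := by
  intro L M _
  unfold Spec_listProd
  exact listProd_eq_alt L M
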